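-- pv_equiv track=rewrite | github.com/Lucas544875/Post-Correspondence-Problem-of-sushi | pcp-solver/pcp_generator.py | _generate_initial_pairs
-- ===== SOURCE A (Python) =====
-- import itertools
-- from typing import List, Tuple, Dict, Iterator
--
-- def _generate_initial_pairs(chars: List[str], max_len: int) -> Iterator[Tuple[str, str]]:
--     """初期文字列ペアの生成"""
--     strings = ['']
--     for length in range(1, max_len + 1):
--         for combo in itertools.product(chars, repeat=length):
--             strings.append(''.join(combo))
--
--     for top in strings:
--         for bottom in strings:
--             # 興味深い組み合わせのみ選択
--             if len(top) + len(bottom) <= 3:  # 合計長制限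
--                 yield (top, bottom)
-- ===== SOURCE B (Python) =====
-- def _generate_initial_pairs(chars, max_len):
--     """Level-wise extension with pruning: only strings of length <= 3 can ever
--     appear in a yielded pair, so longer ones are dropped as soon as they arise;
--     bottoms are grouped by length budget once instead of re-filtering per top."""
--     shorts = ['']
--     prev = ['']
--     for _ in range(max_len):
--         prev = [s + c for s in prev for c in chars if len(s) + len(c) <= 3]
--         if not prev:
--             break
--         shorts += prev
--     by_budget = [[s for s in shorts if len(s) <= b] for b in range(4)]
--     for top in shorts:
--         for bottom in by_budget[3 - len(top)]:
--             yield (top, bottom)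
-- ===== Notes on version B (the rewrite author's own statement) =====
-- stated objective: faster
-- what changed: B builds candidate strings level by level, pruning every string longer than 3 characters as soon as it arises (it can never be yielded) and stopping when a level is empty, and groups bottoms into four length-budget buckets built once instead of re-scanning the full list for every top; A exhaustively materialises all |chars|^length combinations up to max_len and filters the quadratic cross product.
import Mathlib
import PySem

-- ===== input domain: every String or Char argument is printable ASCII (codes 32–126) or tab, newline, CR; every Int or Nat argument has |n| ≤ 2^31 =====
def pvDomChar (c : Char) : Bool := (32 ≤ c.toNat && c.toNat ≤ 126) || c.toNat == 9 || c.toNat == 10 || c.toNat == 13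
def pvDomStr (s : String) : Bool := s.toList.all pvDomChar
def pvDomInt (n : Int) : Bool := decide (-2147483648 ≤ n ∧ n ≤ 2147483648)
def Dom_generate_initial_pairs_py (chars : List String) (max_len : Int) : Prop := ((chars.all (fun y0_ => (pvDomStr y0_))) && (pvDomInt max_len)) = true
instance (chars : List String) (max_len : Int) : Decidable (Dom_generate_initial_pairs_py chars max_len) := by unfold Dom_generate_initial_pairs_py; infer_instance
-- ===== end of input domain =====

-- B replaces A's exhaustive |chars|^max_len string enumeration by level-wise extension
-- that prunes strings longer than 3 (they can never be yielded) and groups bottoms by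
-- length budget once, instead of re-scanning the whole list for every top (objective: faster).
-- Both versions are pure (the Python generator is compared as the list of yielded pairs).

-- ===== PORT A =====
-- itertools.product(chars, repeat=n), ported by hand: exact tuple order (first coordinate varies slowest)
def pvProdRepeat (chars : List String) : Nat → List (List String)
  | 0 => [[]]
  | n + 1 => chars.flatMap (fun c => (pvProdRepeat chars n).map (fun combo => c :: combo))

def generate_initial_pairs_py (chars : List String) (max_len : Int) : List (String × String) :=
  -- strings = ['']; for length in range(1, max_len+1): for combo in product(chars, repeat=length): strings.append(''.join(combo))
  -- (length is drawn from range(1, …) so it is ≥ 1 and .toNat is exact)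
  let strings := (PySem.List.pyRange 1 (max_len + 1) 1).foldl
    (fun acc length =>
      acc ++ (pvProdRepeat chars length.toNat).map (fun combo => PySem.Str.join "" combo)) [""]
  -- for top in strings: for bottom in strings: if len(top)+len(bottom) <= 3: yield (top, bottom)
  strings.foldl (fun out top =>
    strings.foldl (fun out bottom =>
      if PySem.Str.len top + PySem.Str.len bottom ≤ 3 then out ++ [(top, bottom)] else out) out) []

-- ===== PORT B =====
-- prev = [s + c for s in prev for c in chars if len(s) + len(c) <= 3]
def pvExtend (chars : List String) (prev : List String) : List String :=
  prev.flatMap (fun s => chars.filterMap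
    (fun c => if PySem.Str.len s + PySem.Str.len c ≤ 3 then some (s ++ c) else none))

-- the 'for _ in range(max_len)' loop with its 'if not prev: break'; returns everything added to shorts
def pvLevels (chars : List String) : Nat → List String → List String
  | 0, _ => []
  | n + 1, prev =>
      let next := pvExtend chars prev
      if next = [] then [] else next ++ pvLevels chars n next

def generate_initial_pairs_py_alt (chars : List String) (max_len : Int) : List (String × String) :=
  let shorts := "" :: pvLevels chars max_len.toNat [""]
  -- by_budget = [[s for s in shorts if len(s) <= b] for b in range(4)]
  let by_budget := (PySem.List.pyRange 0 4 1).map (fun b => shorts.filter (fun s => PySem.Str.len s ≤ b))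
  shorts.flatMap (fun top =>
    (PySem.List.pyGetD by_budget (3 - PySem.Str.len top) []).map (fun bottom => (top, bottom)))

-- ===== PRECONDITION & SPEC =====
def Spec_generate_initial_pairs_py (chars : List String) (max_len : Int) (out : List (String × String)) : Prop := out = generate_initial_pairs_py_alt chars max_len
instance (chars : List String) (max_len : Int) (out : List (String × String)) : Decidable (Spec_generate_initial_pairs_py chars max_len out) := by unfold Spec_generate_initial_pairs_py; infer_instance

-- ===== CLAIM (what is proved, stated in full; the proofs are below) =====
def Claim_equal_generate_initial_pairs_py : Prop := ∀ (chars : List String) (max_len : Int), Dom_generate_initial_pairs_py chars max_len → Spec_generate_initial_pairs_py chars max_len (generate_initial_pairs_py chars max_len)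

-- ===== LEMMAS AND PROOFS =====
theorem pv_len_nonneg (s : String) : 0 ≤ PySem.Str.len s := by
  simp [PySem.Str.len_eq]
theorem pv_join_nil : PySem.Str.join "" [] = "" := by
  rw [← String.toList_inj]; simp [PySem.Str.toList_join, PySem.Chars.join_nil]
theorem pv_join_cons (c : String) (l : List String) :
    PySem.Str.join "" (c :: l) = c ++ PySem.Str.join "" l := by
  rw [← String.toList_inj]
  cases l with
  | nil => simp [PySem.Str.toList_join, PySem.Chars.join_singleton, PySem.Chars.join_nil]
  | cons q rest => simp [PySem.Str.toList_join, PySem.Chars.join_cons_cons]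
def pvJ (chars : List String) (n : Nat) : List String :=
  (pvProdRepeat chars n).map (fun combo => PySem.Str.join "" combo)
def pvEXT (chars : List String) (l : List String) : List String :=
  l.flatMap (fun s => chars.map (fun c => s ++ c))
theorem pvJ_zero (chars : List String) : pvJ chars 0 = [""] := by
  simp [pvJ, pvProdRepeat, pv_join_nil]
theorem pvJ_succ_prepend (chars : List String) (n : Nat) :
    pvJ chars (n + 1) = chars.flatMap (fun c => (pvJ chars n).map (fun s => c ++ s)) := by
  simp [pvJ, pvProdRepeat, List.map_flatMap, Function.comp_def, pv_join_cons]
theorem pv_swap_generic (chars l : List String) :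
    chars.flatMap (fun c => (pvEXT chars l).map (fun s => c ++ s))
      = pvEXT chars (chars.flatMap (fun c => l.map (fun s => c ++ s))) := by
  simp [pvEXT, List.map_flatMap, List.flatMap_assoc, List.flatMap_map, Function.comp_def,
    String.append_assoc]
theorem pvJ_succ (chars : List String) (n : Nat) :
    pvJ chars (n + 1) = pvEXT chars (pvJ chars n) := by
  induction n with
  | zero => simp [pvJ_succ_prepend, pvJ_zero, pvEXT]
  | succ n ih =>
      rw [pvJ_succ_prepend, ih, pv_swap_generic, ← pvJ_succ_prepend, ih]
theorem pvStringsA_eq (chars : List String) (max_len : Int) :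
    (PySem.List.pyRange 1 (max_len + 1) 1).foldl
      (fun acc length =>
        acc ++ (pvProdRepeat chars length.toNat).map (fun combo => PySem.Str.join "" combo)) [""]
    = "" :: (List.range max_len.toNat).flatMap (fun k => pvJ chars (k + 1)) := by
  rw [PySem.List.pyRange_one]
  rw [List.foldl_map]
  have h : (fun (acc : List String) (k : Nat) =>
      acc ++ (pvProdRepeat chars ((1 : Int) + (k : Int)).toNat).map (fun combo => PySem.Str.join "" combo))
      = fun acc k => acc ++ pvJ chars (k + 1) := by
    funext acc k
    have : ((1 : Int) + (k : Int)).toNat = k + 1 := by omega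
    rw [this]; rfl
  rw [h, PySem.List.foldl_append_eq_flatMap]
  simp
-- B-side machinery
def pvP (s : String) : Bool := PySem.Str.len s ≤ 3

theorem pv_filterMap_if (s : String) (chars : List String) :
    chars.filterMap (fun c => if PySem.Str.len s + PySem.Str.len c ≤ 3 then some (s ++ c) else none)
      = (chars.map (fun c => s ++ c)).filter pvP := by
  induction chars with
  | nil => rfl
  | cons c cs ih =>
      rw [List.filterMap_cons, List.map_cons, List.filter_cons, ← ih]
      by_cases h : PySem.Str.len s + PySem.Str.len c ≤ 3
      · have hp : pvP (s ++ c) = true := by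
          simp only [pvP, PySem.Str.len_append, decide_eq_true_eq]; omega
        rw [if_pos h]; simp [hp]
      · have hp : pvP (s ++ c) = false := by
          simp only [pvP, PySem.Str.len_append, decide_eq_false_iff_not, not_le]; omega
        rw [if_neg h]; simp [hp]

theorem pvExtend_eq (chars l : List String) :
    pvExtend chars l = (pvEXT chars l).filter pvP := by
  simp only [pvExtend, pvEXT, List.filter_flatMap]
  congr 1
  funext s
  exact pv_filterMap_if s chars

theorem pv_flatMap_filter {α : Type} (l : List String) (g : String → List α)
    (h : ∀ s, pvP s = false → g s = []) :
    (l.filter pvP).flatMap g = l.flatMap g := by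
  induction l with
  | nil => rfl
  | cons x xs ih =>
      by_cases hx : pvP x
      · simp [hx, ih]
      · simp only [Bool.not_eq_true] at hx
        simp [hx, ih, h x hx]

theorem pvExtend_filter (chars l : List String) :
    pvExtend chars (l.filter pvP) = (pvEXT chars l).filter pvP := by
  rw [pvExtend_eq]
  simp only [pvEXT, List.filter_flatMap]
  apply pv_flatMap_filter
  intro s hs
  rw [List.filter_eq_nil_iff]
  intro t ht
  simp only [List.mem_map] at ht
  obtain ⟨c, _, rfl⟩ := ht
  simp only [pvP, decide_eq_false_iff_not, not_le] at hs
  have hc := pv_len_nonneg c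
  simp only [pvP, PySem.Str.len_append, decide_eq_true_eq]
  omega

def pvIter (chars : List String) : Nat → List String → List String
  | 0, l => l
  | n + 1, l => pvIter chars n (pvExtend chars l)

theorem pvIter_succ' (chars : List String) (n : Nat) (l : List String) :
    pvIter chars (n + 1) l = pvExtend chars (pvIter chars n l) := by
  induction n generalizing l with
  | zero => rfl
  | succ n ih => rw [pvIter, ih]; rfl

theorem pvExtend_nil (chars : List String) : pvExtend chars [] = [] := rfl

theorem pvIter_nil (chars : List String) (n : Nat) : pvIter chars n [] = [] := by
  induction n with
  | zero => rfl
  | succ n ih => rw [pvIter, pvExtend_nil, ih]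

theorem pvLevels_eq (chars : List String) (n : Nat) (prev : List String) :
    pvLevels chars n prev = (List.range n).flatMap (fun k => pvIter chars (k + 1) prev) := by
  induction n generalizing prev with
  | zero => rfl
  | succ n ih =>
      show (if pvExtend chars prev = [] then []
        else pvExtend chars prev ++ pvLevels chars n (pvExtend chars prev)) = _
      by_cases hnil : pvExtend chars prev = []
      · rw [if_pos hnil]
        symm
        rw [List.flatMap_eq_nil_iff]
        intro k _
        rw [pvIter, hnil, pvIter_nil]
      · rw [if_neg hnil, ih, List.range_succ_eq_map, List.flatMap_cons, List.flatMap_map]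
        rfl

theorem pvP_empty : pvP "" = true := by
  simp [pvP, PySem.Str.len_eq]

theorem pvIter_one (chars : List String) (k : Nat) :
    pvIter chars k [""] = (pvJ chars k).filter pvP := by
  induction k with
  | zero => simp [pvIter, pvJ_zero, pvP_empty]
  | succ k ih =>
      rw [pvIter_succ', ih, pvExtend_filter, ← pvJ_succ]

-- the common closed form of A's `strings` list
def pvS (chars : List String) (m : Nat) : List String :=
  "" :: (List.range m).flatMap (fun k => pvJ chars (k + 1))

theorem pv_shorts_eq (chars : List String) (m : Nat) :
    "" :: pvLevels chars m [""] = (pvS chars m).filter pvP := by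
  rw [pvLevels_eq]
  have h : (List.range m).flatMap (fun k => pvIter chars (k + 1) [""])
      = (List.range m).flatMap (fun k => (pvJ chars (k + 1)).filter pvP) :=
    List.flatMap_congr (fun k _ => pvIter_one chars (k + 1))
  rw [h, pvS, List.filter_cons, pvP_empty, List.filter_flatMap]
  simp

theorem pv_A_closed (chars : List String) (max_len : Int) :
    generate_initial_pairs_py chars max_len
      = (pvS chars max_len.toNat).flatMap (fun top =>
          ((pvS chars max_len.toNat).filter
            (fun b => decide (PySem.Str.len top + PySem.Str.len b ≤ 3))).map (fun b => (top, b))) := by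
  simp only [generate_initial_pairs_py]
  rw [pvStringsA_eq]
  have h1 : ∀ (L : List String) (out : List (String × String)) (top : String),
      L.foldl (fun out bottom =>
        if PySem.Str.len top + PySem.Str.len bottom ≤ 3 then out ++ [(top, bottom)] else out) out
      = out ++ (L.filter (fun b => decide (PySem.Str.len top + PySem.Str.len b ≤ 3))).map
          (fun b => (top, b)) := by
    intro L out top
    exact PySem.List.foldl_append_ite _ _ _ _
  simp only [h1]
  rw [PySem.List.foldl_append_eq_flatMap, List.nil_append]
  rfl

theorem pv_B_closed (chars : List String) (max_len : Int) :
    generate_initial_pairs_py_alt chars max_len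
      = ((pvS chars max_len.toNat).filter pvP).flatMap (fun top =>
          (((pvS chars max_len.toNat).filter pvP).filter
            (fun b => decide (PySem.Str.len b ≤ 3 - PySem.Str.len top))).map (fun b => (top, b))) := by
  simp only [generate_initial_pairs_py_alt]
  rw [pv_shorts_eq]
  apply List.flatMap_congr
  intro top htop
  have hp : pvP top = true := (List.mem_filter.mp htop).2
  have h3 : PySem.Str.len top ≤ 3 := by simpa [pvP] using hp
  have h0 := pv_len_nonneg top
  have hnn : (0 : Int) ≤ 3 - PySem.Str.len top := by omega
  rw [PySem.List.pyGetD_map_pyRange_of_nonneg _ 4 _ _ hnn (by omega)]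

theorem pv_cond_eq (top : String) (h0 : 0 ≤ PySem.Str.len top) (h3 : PySem.Str.len top ≤ 3)
    (b : String) :
    (decide (PySem.Str.len top + PySem.Str.len b ≤ 3))
      = (decide (PySem.Str.len b ≤ 3 - PySem.Str.len top) && pvP b) := by
  simp only [pvP, ← Bool.decide_and, decide_eq_decide]
  omega

-- ===== VERDICT (by name: the statement is the Claim_ definition above) =====
theorem generate_initial_pairs_py_spec : Claim_equal_generate_initial_pairs_py := by
  intro chars max_len _
  show generate_initial_pairs_py chars max_len = generate_initial_pairs_py_alt chars max_len
  rw [pv_A_closed, pv_B_closed]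
  rw [← pv_flatMap_filter (pvS chars max_len.toNat)
    (g := fun top => ((pvS chars max_len.toNat).filter
      (fun b => decide (PySem.Str.len top + PySem.Str.len b ≤ 3))).map (fun b => (top, b)))
    (by
      intro t ht
      simp only [pvP, decide_eq_false_iff_not, not_le] at ht
      dsimp only
      rw [List.filter_eq_nil_iff.mpr, List.map_nil]
      intro b _
      have := pv_len_nonneg b
      simp only [decide_eq_true_eq]
      omega)]
  apply List.flatMap_congr
  intro top htop
  have hp : pvP top = true := (List.mem_filter.mp htop).2
  have h3 : PySem.Str.len top ≤ 3 := by simpa [pvP] using hp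
  have h0 := pv_len_nonneg top
  rw [List.filter_filter]
  congr 1
  apply List.filter_congr
  intro b _
  exact pv_cond_eq top h0 h3 b
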